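/-
  THE FIXED jsmn_parse (proofs/c6/jsmn_fixed.c, FIXES.diff): the original body, unchanged, behind a check of its arguments.

  `argsOk` is the check, as a Boolean function of the model's state — line for line the `if`s of the new jsmn_parse;
  `parseFixed` is the new jsmn_parse: JSMN_ERROR_INVAL with nothing touched if the check fails, else the original `parse`.
    argsOk_inv        the check implies the precondition `Inv` of the original (so the fixed function needs NO precondition on the parser's fields
                      or the array's content: only that the array has `num_tokens` entries, which no C code can check);
    parseFixed_total  the fixed function always terminates, whatever the parser struct and the token array contain;
    parseFixed_eq     on every call that satisfies the original's precondition (and `num_tokens < 2^31`, `toknext + len < 2^31`) the fixed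
                      function IS the original: nothing changes for correct callers.
-/
import Json.Jsmn.Terminates

namespace Jsmn

/-- `for (k = 0; k < parser->toknext; k++) if (tokens[k].parent < -1 || tokens[k].parent >= (int)k) return JSMN_ERROR_INVAL;` -/
def linksOk (ts : Tokens) (toknext : Nat) : Bool :=
  (List.range toknext).all fun i => decide (-1 ≤ (ts.getD i default).parent) && decide ((ts.getD i default).parent < (i : Int))

/-- The argument check of the fixed jsmn_parse (`len` is `js.length`). -/
def argsOk (cfg : Config) (len : Nat) (p : Parser) (toks : Option Tokens) (numTokens : Nat) : Bool :=
  decide (len ≤ 2147483647) && decide (p.toknext ≤ 2147483647 - len) &&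
    match toks with
    | none => true
    | some ts =>
      decide (numTokens ≤ 2147483647) && decide (p.toknext ≤ numTokens) && decide (-1 ≤ p.toksuper) &&
        (if cfg.parentLinks then decide (p.toksuper < (p.toknext : Int)) && linksOk ts p.toknext else decide (p.toksuper < (numTokens : Int)))

/-- **The fixed `jsmn_parse`.** -/
def parseFixed (cfg : Config) (js : List UInt8) (p : Parser) (toks : Option Tokens) (numTokens : Nat) : Option (Int × Parser × Option Tokens) :=
  if argsOk cfg js.length p toks numTokens then parse cfg js p toks numTokens else some (JSMN_ERROR_INVAL, p, toks)

/-- What is true of ANY memory content read as a parser struct and a `num_tokens` argument: the numbers fit their C types. -/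
structure Typed (p : Parser) (numTokens : Nat) : Prop where
  pos : p.pos < 4294967296
  toknext : p.toknext < 4294967296
  superR : -2147483648 ≤ p.toksuper ∧ p.toksuper < 2147483648
  numR : numTokens < 4294967296

theorem linksOk_iff (ts : Tokens) (k : Nat) :
    linksOk ts k = true ↔ ∀ i, i < k → -1 ≤ (ts.getD i default).parent ∧ (ts.getD i default).parent < (i : Int) := by
  simp [linksOk, List.all_eq_true]

/-- **The check establishes the original's precondition.** -/
theorem argsOk_inv {cfg : Config} {len : Nat} {p : Parser} {toks : Option Tokens} {n : Nat} (ht : Typed p n)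
    (hl : ∀ ts, toks = some ts → ts.length = n) (h : argsOk cfg len p toks n = true) :
    Inv cfg p toks n ∧ len < 2147483648 ∧ p.toknext + len < 2147483648 := by
  simp only [argsOk, Bool.and_eq_true, decide_eq_true_eq] at h
  obtain ⟨⟨h1, h2⟩, h3⟩ := h
  refine ⟨⟨ht.pos, ht.toknext, ht.superR, ht.numR, ?_⟩, by omega, by omega⟩
  intro ts hts
  subst hts
  simp only [Bool.and_eq_true, decide_eq_true_eq] at h3
  obtain ⟨⟨⟨hn, htn⟩, hlo⟩, hhi⟩ := h3
  refine ⟨hl ts rfl, by omega, htn, hlo, ?_, ?_⟩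
  · cases hpl : cfg.parentLinks <;> simp only [hpl, if_true, if_false, Bool.false_eq_true, Bool.and_eq_true, decide_eq_true_eq] at hhi ⊢
    · exact hhi
    · exact hhi.1
  · intro hpl i hi
    simp only [hpl, if_true, Bool.and_eq_true, decide_eq_true_eq] at hhi
    exact (linksOk_iff ts p.toknext).mp hhi.2 i hi

/-- **The fixed jsmn_parse always terminates** — for every content of the parser struct and of the token array. -/
theorem parseFixed_total (cfg : Config) (js : List UInt8) (p : Parser) (toks : Option Tokens) (n : Nat) (ht : Typed p n)
    (hl : ∀ ts, toks = some ts → ts.length = n) : ∃ res, parseFixed cfg js p toks n = some res := by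
  unfold parseFixed
  split
  · next h =>
    obtain ⟨hinv, hlen, _⟩ := argsOk_inv ht hl h
    exact parse_total cfg js p toks n (by omega) hinv
  · exact ⟨_, rfl⟩

/-- The precondition of the original implies the check (for `num_tokens < 2^31` and `toknext + len < 2^31`). -/
theorem argsOk_of_inv {cfg : Config} {len : Nat} {p : Parser} {toks : Option Tokens} {n : Nat} (hinv : Inv cfg p toks n)
    (hn : n ≤ 2147483647) (hlen : p.toknext + len ≤ 2147483647) : argsOk cfg len p toks n = true := by
  simp only [argsOk, Bool.and_eq_true, decide_eq_true_eq]
  refine ⟨⟨by omega, by omega⟩, ?_⟩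
  cases toks with
  | none => rfl
  | some ts =>
    have ti := hinv.toks ts rfl
    simp only [Bool.and_eq_true, decide_eq_true_eq]
    refine ⟨⟨⟨hn, ti.toknext⟩, ti.superLo⟩, ?_⟩
    have hhi := ti.superHi
    cases hpl : cfg.parentLinks <;> simp only [hpl, if_true, if_false, Bool.false_eq_true, Bool.and_eq_true, decide_eq_true_eq] at hhi ⊢
    · exact hhi
    · exact ⟨hhi, (linksOk_iff ts p.toknext).mpr (ti.links hpl)⟩

/-- **Nothing changes for correct callers**: where the original's precondition holds, the fixed function is the original. -/
theorem parseFixed_eq (cfg : Config) (js : List UInt8) (p : Parser) (toks : Option Tokens) (n : Nat) (hinv : Inv cfg p toks n)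
    (hn : n ≤ 2147483647) (hlen : p.toknext + js.length ≤ 2147483647) : parseFixed cfg js p toks n = parse cfg js p toks n := by
  unfold parseFixed
  rw [argsOk_of_inv hinv hn hlen, if_pos rfl]

end Jsmn
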